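-- pv_equiv track=rewrite | github.com/yongunt/problems | scrambled_letters/main.py | scrambled
-- ===== SOURCE A (Python) =====
-- def scrambled(words:list, mask:str) -> list:
--     ans:list = []
--
--     for word in words:
--         flag:bool = False
--
--         if len(word) == len(mask):
--             for w, m in zip(word, mask):
--                 if w == m or m == '*': flag = True
--                 else:
--                     flag = False
--                     break
--
--         if flag: ans.append(word)
--
--     return ans
-- ===== SOURCE B (Python) =====
-- def scrambled(words: list, mask: str) -> list:
--     def veil(word):
--         return ''.join('*' if m == '*' else c for c, m in zip(word, mask))
--     return [w for w in words if len(w) == len(mask) and veil(w) == mask]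
-- ===== Notes on version B (the rewrite author's own statement) =====
-- stated objective: alternative
-- what changed: B normalizes each word by overwriting its wildcard positions with '*' and keeps the word iff that veiled string equals the mask itself, a transform-and-compare strategy instead of A's per-position flag loop with break.
-- intended difference: When the mask is empty and the list contains empty words, A returns [] because its match flag is only ever set inside the never-executed zip loop, while B returns those empty words; an empty word trivially matches an empty mask, so B's value is the intended one. — e.g. on scrambled([""], ""): A returns [], B returns [""]
import Mathlib
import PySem

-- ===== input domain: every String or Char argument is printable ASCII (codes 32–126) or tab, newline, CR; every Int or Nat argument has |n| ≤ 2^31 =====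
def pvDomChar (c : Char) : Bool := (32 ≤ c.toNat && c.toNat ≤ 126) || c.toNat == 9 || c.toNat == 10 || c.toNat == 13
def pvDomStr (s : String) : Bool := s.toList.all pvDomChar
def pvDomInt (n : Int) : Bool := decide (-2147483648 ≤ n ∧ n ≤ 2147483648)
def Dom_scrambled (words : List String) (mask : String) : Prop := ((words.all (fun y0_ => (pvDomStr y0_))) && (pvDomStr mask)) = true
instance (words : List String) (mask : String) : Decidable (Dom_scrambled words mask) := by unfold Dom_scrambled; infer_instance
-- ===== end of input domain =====

-- B keeps a word iff the word with its wildcard positions overwritten by '*' equals the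
-- mask (transform-and-compare), instead of A's per-position flag loop; same cost, and B
-- returns the empty words under an empty mask where A's flag accidentally never fires (D_ below).

-- ===== PORT A =====
-- A's inner 'for w, m in zip(word, mask)' loop with its break and flag variable
def scramLoopA : List (Char × Char) → Bool → Bool
  | [], flag => flag
  | (w, m) :: rest, _ => if w == m || m == '*' then scramLoopA rest true else false

def scrambled (words : List String) (mask : String) : List String :=
  words.foldl (fun ans word =>
    let flag : Bool :=
      if PySem.Str.len word == PySem.Str.len mask then
        scramLoopA (word.toList.zip mask.toList) false
      else false
    if flag then ans ++ [word] else ans) []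

-- ===== PORT B =====
-- Source B's veil: ''.join over zip(word, mask); string equality ported as equality of char lists (exact)
def scramVeil (word : List Char) (mask : List Char) : List Char :=
  (word.zip mask).map (fun p => if p.2 == '*' then '*' else p.1)

def scrambled_alt (words : List String) (mask : String) : List String :=
  words.filter (fun w =>
    PySem.Str.len w == PySem.Str.len mask && scramVeil w.toList mask.toList == mask.toList)

-- ===== PRECONDITION & SPEC =====
-- When the mask is empty and words contains the empty string, A returns [] (its flag can only be
-- set inside the zip loop, which never runs), while B returns those empty words; an empty word
-- trivially matches an empty mask, so B's value is the intended one.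
def D_scrambled (words : List String) (mask : String) : Prop := mask = "" ∧ "" ∈ words
instance (words : List String) (mask : String) : Decidable (D_scrambled words mask) := by unfold D_scrambled; infer_instance

def Spec_scrambled (words : List String) (mask : String) (out : List String) : Prop := ¬ D_scrambled words mask → out = scrambled_alt words mask
instance (words : List String) (mask : String) (out : List String) : Decidable (Spec_scrambled words mask out) := by unfold Spec_scrambled; infer_instance

def pvDiffWitness_scrambled : List String × String := ([""], "")
def pvDiffWitnessOut_scrambled : (List String) × (List String) := ([], [""])

-- ===== CLAIM (what is proved, stated in full; the proofs are below) =====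
def Claim_unchanged_scrambled : Prop := ∀ (words : List String) (mask : String), Dom_scrambled words mask → Spec_scrambled words mask (scrambled words mask)
def Claim_changed_scrambled : Prop := Dom_scrambled (pvDiffWitness_scrambled.1) (pvDiffWitness_scrambled.2) ∧ D_scrambled (pvDiffWitness_scrambled.1) (pvDiffWitness_scrambled.2) ∧ scrambled (pvDiffWitness_scrambled.1) (pvDiffWitness_scrambled.2) = pvDiffWitnessOut_scrambled.1 ∧ scrambled_alt (pvDiffWitness_scrambled.1) (pvDiffWitness_scrambled.2) = pvDiffWitnessOut_scrambled.2 ∧ pvDiffWitnessOut_scrambled.1 ≠ pvDiffWitnessOut_scrambled.2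
def Claim_exact_scrambled : Prop := ∀ (words : List String) (mask : String), Dom_scrambled words mask → D_scrambled words mask → scrambled words mask ≠ scrambled_alt words mask

-- ===== LEMMAS AND PROOFS =====

theorem scramLoopA_true (zs : List (Char × Char)) :
    scramLoopA zs true = zs.all (fun p => p.1 == p.2 || p.2 == '*') := by
  induction zs with
  | nil => rfl
  | cons z zs ih =>
    obtain ⟨w, m⟩ := z
    rcases h : (w == m || m == '*') with _ | _ <;> simp [scramLoopA, h, ih]

theorem scramLoopA_false (zs : List (Char × Char)) :
    scramLoopA zs false = (!zs.isEmpty && zs.all (fun p => p.1 == p.2 || p.2 == '*')) := by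
  cases zs with
  | nil => rfl
  | cons z zs =>
    obtain ⟨w, m⟩ := z
    rcases h : (w == m || m == '*') with _ | _ <;> simp [scramLoopA, h, scramLoopA_true]

-- the veiled word equals the mask iff every zipped pair matches (given equal lengths)
theorem veil_eq_iff (word mask : List Char) (h : word.length = mask.length) :
    (scramVeil word mask == mask) = (word.zip mask).all (fun p => p.1 == p.2 || p.2 == '*') := by
  induction mask generalizing word with
  | nil =>
    cases word with
    | nil => rfl
    | cons _ _ => simp at h
  | cons m ms ih =>
    cases word with
    | nil => simp at h
    | cons w ws =>
      have h' : ws.length = ms.length := by simpa using h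
      have hcons : scramVeil (w :: ws) (m :: ms)
          = (if m == '*' then '*' else w) :: scramVeil ws ms := rfl
      rw [hcons]
      simp only [List.cons_beq_cons, List.zip_cons_cons, List.all_cons, ih ws h']
      by_cases hm : m = '*'
      · subst hm; simp
      · have hm' : (m == '*') = false := by simpa using hm
        simp [hm']

-- pointwise: A's per-word flag equals B's predicate, except for the empty word under an empty mask
theorem flag_eq_pred (w mask : String) (hok : mask ≠ "" ∨ w ≠ "") :
    (if PySem.Str.len w == PySem.Str.len mask then
        scramLoopA (w.toList.zip mask.toList) false
      else false)
    = (PySem.Str.len w == PySem.Str.len mask && scramVeil w.toList mask.toList == mask.toList) := by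
  by_cases hlen : PySem.Str.len w = PySem.Str.len mask
  · have hlen' : w.toList.length = mask.toList.length := by
      simp only [PySem.Str.len_eq, Nat.cast_inj] at hlen
      simpa [String.length_toList] using hlen
    have ht : (PySem.Str.len w == PySem.Str.len mask) = true := beq_iff_eq.mpr hlen
    simp only [ht, Bool.true_and, if_pos trivial]
    rw [scramLoopA_false, veil_eq_iff _ _ hlen']
    have hm : mask.toList ≠ [] := by
      rcases hok with h | h
      · simpa [← String.toList_eq_nil_iff] using h
      · intro hnil
        have hw0 : w.toList = [] := by
          rw [hnil] at hlen'
          exact List.eq_nil_of_length_eq_zero (by simpa using hlen')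
        exact h (by simpa [← String.toList_eq_nil_iff] using hw0)
    have hz : (w.toList.zip mask.toList).isEmpty = false := by
      cases hmm : mask.toList with
      | nil => exact absurd hmm hm
      | cons m ms =>
        cases hww : w.toList with
        | nil => rw [hww, hmm] at hlen'; simp at hlen'
        | cons a as => rfl
    simp [hz]
  · have hf : (PySem.Str.len w == PySem.Str.len mask) = false := beq_eq_false_iff_ne.mpr hlen
    simp only [hf, Bool.false_and, Bool.false_eq_true, if_false]

-- with an empty mask, A's flag is false for every word
theorem flag_false_of_empty (w : String) :
    (if PySem.Str.len w == PySem.Str.len ("" : String) then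
        scramLoopA (w.toList.zip ("" : String).toList) false
      else false) = false := by
  have hz : w.toList.zip ("" : String).toList = [] := by simp
  rw [hz]
  split <;> rfl

-- ===== VERDICT (by name: the statement is the Claim_ definition above) =====
theorem scrambled_spec : Claim_unchanged_scrambled := by
  intro words mask _ hD
  unfold scrambled scrambled_alt
  rw [PySem.List.foldl_append_if_eq_filter]
  simp only [List.nil_append]
  refine List.filter_congr (fun w hw => ?_)
  refine flag_eq_pred w mask ?_
  by_cases hm : mask = ""
  · right
    intro hwe
    exact hD ⟨hm, hwe ▸ hw⟩
  · exact Or.inl hm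

theorem scrambled_changed : Claim_changed_scrambled := by
  unfold Claim_changed_scrambled; decide

theorem scrambled_tight : Claim_exact_scrambled := by
  intro words mask _ hD heq
  obtain ⟨hm, hmem⟩ := hD
  subst hm
  have hA : scrambled words "" = [] := by
    unfold scrambled
    rw [PySem.List.foldl_append_if_eq_filter]
    simp only [List.nil_append]
    rw [List.filter_eq_nil_iff.mpr (fun w _ => by simpa using flag_false_of_empty w)]
  have hB : ("" : String) ∈ scrambled_alt words "" := by
    unfold scrambled_alt
    refine List.mem_filter.mpr ⟨hmem, ?_⟩
    decide
  rw [← heq, hA] at hB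
  exact List.not_mem_nil hB
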